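-- pv_equiv track=rewrite | github.com/amgayathri3/fampnn | generate_fampnn_cdr_mask_csv.py | group_contiguous_positions
-- ===== SOURCE A (Python) =====
-- def group_contiguous_positions(positions):
--     if not positions:
--         return []
--     positions = sorted(positions)
--     ranges = []
--     start = prev = positions[0]
--     for pos in positions[1:]:
--         if pos == prev + 1:
--             prev = pos
--         else:
--             ranges.append((start, prev))
--             start = prev = pos
--     ranges.append((start, prev))
--     return ranges
-- ===== SOURCE B (Python) =====
-- from itertools import groupby
--
--
-- def group_contiguous_positions(positions):
--     # value - index is constant across a contiguous run of sorted values
--     ranges = []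
--     for _, grp in groupby(enumerate(sorted(positions)), key=lambda iv: iv[1] - iv[0]):
--         vals = [v for _, v in grp]
--         ranges.append((vals[0], vals[-1]))
--     return ranges
-- ===== Notes on version B (the rewrite author's own statement) =====
-- stated objective: idiomatic
-- what changed: Replaces A's explicit start/prev accumulator loop with enumerate + itertools.groupby keyed on value - index (constant across a contiguous run), emitting (first, last) of each group.
import Mathlib
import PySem

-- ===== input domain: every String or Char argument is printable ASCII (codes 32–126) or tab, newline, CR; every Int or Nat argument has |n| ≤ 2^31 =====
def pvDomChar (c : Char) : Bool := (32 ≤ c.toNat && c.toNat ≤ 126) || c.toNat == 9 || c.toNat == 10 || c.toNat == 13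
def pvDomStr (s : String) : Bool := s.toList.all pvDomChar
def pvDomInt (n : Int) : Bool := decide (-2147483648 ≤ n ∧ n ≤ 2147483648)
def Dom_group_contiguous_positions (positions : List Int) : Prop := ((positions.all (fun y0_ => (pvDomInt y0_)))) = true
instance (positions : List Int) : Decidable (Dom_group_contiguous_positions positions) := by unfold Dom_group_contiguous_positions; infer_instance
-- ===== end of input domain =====

-- B replaces A's explicit start/prev accumulator loop by enumerate + itertools.groupby
-- keyed on value - index (constant on a contiguous run); objective: idiomatic, same cost.

-- ===== PORT A =====
-- the for-loop of A: state (start, prev, ranges)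
def pvALoop : Int → Int → List (Int × Int) → List Int → List (Int × Int)
  | start, prev, ranges, [] => ranges ++ [(start, prev)]
  | start, prev, ranges, pos :: rest =>
      if pos = prev + 1 then pvALoop start pos ranges rest
      else pvALoop pos pos (ranges ++ [(start, prev)]) rest

def group_contiguous_positions (positions : List Int) : List (Int × Int) :=
  if positions = [] then []
  else
    match PySem.List.sorted positions (fun x => x) false with
    | [] => []
    | p0 :: rest => pvALoop p0 p0 [] rest

-- ===== PORT B =====
-- itertools.groupby over enumerate(sorted(positions)) with key iv[1] - iv[0], transcribed as a
-- recursion over the enumerated pairs carrying (current key, first value, last value of the group)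
def pvBRun : Int → Int → Int → List (Int × Int) → List (Int × Int)
  | _, first, last, [] => [(first, last)]
  | k, first, last, (i, v) :: rest =>
      if v - i = k then pvBRun k first v rest
      else (first, last) :: pvBRun (v - i) v v rest

def group_contiguous_positions_alt (positions : List Int) : List (Int × Int) :=
  match PySem.List.enumerate (PySem.List.sorted positions (fun x => x) false) with
  | [] => []
  | (i, v) :: rest => pvBRun (v - i) v v rest

-- ===== PRECONDITION & SPEC =====
def Spec_group_contiguous_positions (positions : List Int) (out : List (Int × Int)) : Prop := out = group_contiguous_positions_alt positions
instance (positions : List Int) (out : List (Int × Int)) : Decidable (Spec_group_contiguous_positions positions out) := by unfold Spec_group_contiguous_positions; infer_instance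

-- ===== CLAIM (what is proved, stated in full; the proofs are below) =====
def Claim_equal_group_contiguous_positions : Prop := ∀ (positions : List Int), Dom_group_contiguous_positions positions → Spec_group_contiguous_positions positions (group_contiguous_positions positions)

-- ===== LEMMAS AND PROOFS =====

-- common reference recursion: both loops produce the runs of (first, last) pairs
def pvRuns : Int → Int → List Int → List (Int × Int)
  | first, last, [] => [(first, last)]
  | first, last, p :: rest =>
      if p = last + 1 then pvRuns first p rest
      else (first, last) :: pvRuns p p rest

theorem pvALoop_eq_runs (rest : List Int) : ∀ (start prev : Int) (ranges : List (Int × Int)),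
    pvALoop start prev ranges rest = ranges ++ pvRuns start prev rest := by
  induction rest with
  | nil => intro s p r; simp [pvALoop, pvRuns]
  | cons q t ih =>
      intro s p r
      simp only [pvALoop, pvRuns]
      split_ifs with h
      · exact ih s q r
      · rw [ih q q (r ++ [(s, p)])]; simp

theorem pvBRun_eq_runs (rest : List Int) : ∀ (i k first last : Int),
    last = k + (i - 1) →
    pvBRun k first last (PySem.List.enumerate rest i) = pvRuns first last rest := by
  induction rest with
  | nil => intro i k f l _; simp [PySem.List.enumerate_nil, pvBRun, pvRuns]
  | cons q t ih =>
      intro i k f l hl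
      rw [PySem.List.enumerate_cons]
      simp only [pvBRun, pvRuns]
      subst hl
      simp only [show (q - i = k) ↔ (q = k + (i - 1) + 1) from by omega]
      split_ifs with h
      · exact ih (i + 1) k f q (by omega)
      · rw [ih (i + 1) (q - i) q q (by omega)]

-- ===== VERDICT (by name: the statement is the Claim_ definition above) =====
theorem group_contiguous_positions_spec : Claim_equal_group_contiguous_positions := by
  intro positions _
  unfold Spec_group_contiguous_positions group_contiguous_positions group_contiguous_positions_alt
  by_cases hnil : positions = []
  · subst hnil
    rfl
  · simp only [if_neg hnil]
    have hs : PySem.List.sorted positions (fun x => x) false ≠ [] := by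
      rw [Ne, PySem.List.sorted_eq_nil_iff]; exact hnil
    cases hsort : PySem.List.sorted positions (fun x => x) false with
    | nil => exact absurd hsort hs
    | cons p0 rest =>
        rw [PySem.List.enumerate_cons]
        show pvALoop p0 p0 [] rest = pvBRun (p0 - 0) p0 p0 (PySem.List.enumerate rest (0 + 1))
        rw [pvALoop_eq_runs rest p0 p0 [], pvBRun_eq_runs rest (0 + 1) (p0 - 0) p0 p0 (by omega)]
        simp
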